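-- pv_equiv track=rewrite | github.com/mmore500/hstrat-surface-concept | hsurf/site_selection_strategy/site_selection_algorithms/steady_try_full_algo/_scry/_iter_resident_ingest_ranks.py | steady_lookup_impl
-- ===== SOURCE A (Python) =====
-- import typing
--
-- def steady_lookup_impl(S: int, T: int) -> typing.Iterable[int]:
--     """Implementation detail for `steady_time_lookup`."""
--     assert T >= S  # T < S redirected to T = S by steady_time_lookup
--     s = S.bit_length() - 1
--     t = T.bit_length() - s  # Current epoch
--
--     b = 0  # Bunch physical index (left-to right)
--     m_b__ = 1  # Countdown on segments traversed within bunch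
--     b_star = True  # Have traversed all segments in bunch?
--     k_m__ = s + 1  # Countdown on sites traversed within segment
--     h_ = None  # Candidate hanoi value__
--
--     for k in range(S):  # Iterate over buffer sites, except unused last one
--         # Calculate info about current segment...
--         epsilon_w = b == 0  # Correction on segment width if first segment
--         # Number of sites in current segment (i.e., segment size)
--         w = s - b + epsilon_w
--         m = (1 << b) - m_b__  # Calc left-to-right index of current segment
--         h_max = t + w - 1  # Max possible hanoi value in segment during epoch
--
--         # Calculate candidate hanoi value...
--         _h0, h_ = h_, h_max - (h_max + k_m__) % w
--         assert (_h0 == h_) or b_star  # Can skip h calc if b_star is False...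
--         del _h0  # ... i.e., skip calc within each bunch [[see below]]
--
--         # Decode ingest time of assigned h.v. from segment index g, ...
--         # ... i.e., how many instances of that h.v. seen before
--         T_bar_k_ = ((2 * m + 1) << h_) - 1  # Guess ingest time
--         epsilon_h = (T_bar_k_ >= T) * w  # Correction on h.v. if not yet seen
--         h = h_ - epsilon_h  # Corrected true resident h.v.
--         T_bar_k = ((2 * m + 1) << h) - 1  # True ingest time
--         yield T_bar_k
--
--         # Update within-segment state for next site...
--         k_m__ = (k_m__ or w) - 1  # Bump to next site within segment
--
--         # Update h for next site...
--         # ... only needed if not calculating h fresh every iter [[see above]]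
--         h_ += 1 - (h_ >= h_max) * w
--
--         # Update within-bunch state for next site...
--         m_b__ -= not k_m__  # Bump to next segment within bunch
--         b_star = not (m_b__ or k_m__)  # Should bump to next bunch?
--         b += b_star  # Do bump to next bunch, if any
--         # Set within-bunch segment countdown, if bumping to next bunch
--         m_b__ = m_b__ or (1 << (b - 1))
-- ===== SOURCE B (Python) =====
-- def steady_lookup_impl(S: int, T: int) -> list:
--     """Nested-loop re-implementation: bunches -> segments -> sites, with each
--     candidate hanoi value computed fresh from the site's position."""
--     assert T >= S
--     s = S.bit_length() - 1
--     t = T.bit_length() - s  # Current epoch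
--     out = []
--     for b in range(max(s, 1)):  # Bunch physical index (left-to-right)
--         if len(out) >= S:
--             break
--         w = s - b + (b == 0)  # Segment width within this bunch
--         h_max = t + w - 1  # Max possible hanoi value in segment during epoch
--         # Left-to-right indices of the segments making up bunch b
--         for m in range(1 << (b - 1) if b else 0, 1 << b):
--             for j in range(w):  # Site position within segment
--                 h = h_max - (h_max - j) % w  # Candidate hanoi value
--                 if ((2 * m + 1) << h) - 1 >= T:  # Not yet seen this epoch...
--                     h -= w  # ... so correct down to the resident hanoi value
--                 out.append(((2 * m + 1) << h) - 1)  # Ingest time of resident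
--     return out
-- ===== Notes on version B (the rewrite author's own statement) =====
-- stated objective: alternative
-- what changed: A's single flat loop over buffer sites, driven by carried countdown state (m_b__, k_m__) and incremental bunch bumping, is replaced by explicit nested loops over bunches, segments and sites that compute each candidate hanoi value fresh from the site's (b, m, j) position.
import Mathlib
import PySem

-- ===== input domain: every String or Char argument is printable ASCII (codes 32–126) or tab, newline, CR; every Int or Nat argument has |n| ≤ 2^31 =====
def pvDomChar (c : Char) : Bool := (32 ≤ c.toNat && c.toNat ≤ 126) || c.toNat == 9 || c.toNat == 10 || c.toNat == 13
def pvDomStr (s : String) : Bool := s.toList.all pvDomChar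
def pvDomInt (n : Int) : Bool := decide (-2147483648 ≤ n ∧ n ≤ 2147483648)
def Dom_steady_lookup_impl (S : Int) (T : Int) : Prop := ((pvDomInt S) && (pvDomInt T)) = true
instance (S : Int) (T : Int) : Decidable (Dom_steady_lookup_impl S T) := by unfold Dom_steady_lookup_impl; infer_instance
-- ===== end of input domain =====

-- B rewrites A's flat one-loop state machine as nested loops (bunch → segment → site)
-- computing each candidate hanoi value fresh from the site's position (objective: alternative, same cost).

-- ===== PORT A =====
-- Loop body of A's `for k in range(S)`.  Carried loop state is (b, m_b__, k_m__):
-- `b_star` and `h_` are (re)assigned before every read in the body — their carried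
-- values feed only the asserts, which have no effect on the value A yields.
def steadyStepA (s t T : Int) (st : Int × Int × Int) : (Int × Int × Int) × Int :=
  let b := st.1
  let m_b__ := st.2.1
  let k_m__ := st.2.2
  let epsilon_w : Int := if b = 0 then 1 else 0       -- b == 0 (bool as int)
  let w := s - b + epsilon_w
  let m := 2 ^ b.toNat - m_b__                        -- (1 << b); b ≥ 0 on every reachable state
  let h_max := t + w - 1
  let h_ := h_max - PySem.Int.mod (h_max + k_m__) w   -- Python %; w ≠ 0 wherever A returns
  let T_bar_k_ := (2 * m + 1) * 2 ^ h_.toNat - 1      -- (2m+1) << h_; h_ ≥ 0 wherever A returns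
  let epsilon_h := (if T_bar_k_ ≥ T then (1 : Int) else 0) * w
  let h := h_ - epsilon_h
  let T_bar_k := (2 * m + 1) * 2 ^ h.toNat - 1        -- (2m+1) << h; h ≥ 0 wherever A returns
  let k_m2 := (if k_m__ ≠ 0 then k_m__ else w) - 1    -- (k_m__ or w) - 1
  let m_b2 := m_b__ - (if k_m2 = 0 then 1 else 0)     -- m_b__ -= not k_m__
  let b_star : Bool := decide (m_b2 = 0 ∧ k_m2 = 0)   -- not (m_b__ or k_m__)
  let b2 := b + (if b_star then 1 else 0)
  -- m_b__ or (1 << (b - 1)): Python's `or` short-circuits, so the shift is only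
  -- evaluated when m_b2 = 0 (and then b2 ≥ 1 on every reachable state)
  let m_b3 := if m_b2 ≠ 0 then m_b2 else 2 ^ (b2 - 1).toNat
  ((b2, m_b3, k_m2), T_bar_k)

def steady_lookup_impl (S : Int) (T : Int) : List Int :=
  let s : Int := (PySem.Int.bitLength S : Int) - 1    -- S.bit_length() - 1
  let t : Int := (PySem.Int.bitLength T : Int) - s    -- T.bit_length() - s
  ((PySem.List.pyRange 0 S 1).foldl
    (fun (p : (Int × Int × Int) × List Int) _k =>
      let r := steadyStepA s t T p.1
      (r.1, p.2 ++ [r.2]))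
    ((0, 1, s + 1), ([] : List Int))).2

-- ===== PORT B =====
def steady_lookup_impl_alt (S : Int) (T : Int) : List Int :=
  let s : Int := (PySem.Int.bitLength S : Int) - 1
  let t : Int := (PySem.Int.bitLength T : Int) - s
  (PySem.List.pyRange 0 (max s 1) 1).foldl
    (fun (out : List Int) b =>
      -- `if len(out) >= S: break` — once reached, no later bunch changes out
      if (out.length : Int) ≥ S then out
      else
        let w := s - b + (if b = 0 then 1 else 0)
        let h_max := t + w - 1
        (PySem.List.pyRange (if b ≠ 0 then 2 ^ (b - 1).toNat else 0) (2 ^ b.toNat) 1).foldl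
          (fun (out : List Int) m =>
            (PySem.List.pyRange 0 w 1).foldl
              (fun (out : List Int) j =>
                let h := h_max - PySem.Int.mod (h_max - j) w
                let h2 := if (2 * m + 1) * 2 ^ h.toNat - 1 ≥ T then h - w else h
                out ++ [(2 * m + 1) * 2 ^ h2.toNat - 1])
              out)
          out)
    []

-- ===== PRECONDITION & SPEC =====
-- Pre_ = exactly the inputs where Python A returns: T ≥ S (else the assert raises)
-- and S ≤ 0 (empty range) or S a power of two (else a ZeroDivisionError on `% w`).
def Pre_steady_lookup_impl (S : Int) (T : Int) : Prop :=
  S ≤ T ∧ (S ≤ 0 ∨ S = 2 ^ (PySem.Int.bitLength S - 1))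
instance (S : Int) (T : Int) : Decidable (Pre_steady_lookup_impl S T) := by
  unfold Pre_steady_lookup_impl; infer_instance

def pvWitness_steady_lookup_impl : Int × Int := (4, 8)

def Spec_steady_lookup_impl (S : Int) (T : Int) (out : List Int) : Prop := out = steady_lookup_impl_alt S T
instance (S : Int) (T : Int) (out : List Int) : Decidable (Spec_steady_lookup_impl S T out) := by unfold Spec_steady_lookup_impl; infer_instance

-- ===== CLAIM (what is proved, stated in full; the proofs are below) =====
def Claim_equal_steady_lookup_impl : Prop := ∀ (S : Int) (T : Int), Dom_steady_lookup_impl S T → Pre_steady_lookup_impl S T → Spec_steady_lookup_impl S T (steady_lookup_impl S T)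

-- ===== LEMMAS AND PROOFS =====

-- Segment width of bunch b (b = 0 has one extra site).
def pvW (s b : Int) : Int := s - b + (if b = 0 then 1 else 0)
-- Number of segments in bunch b.
def pvSegs (b : Int) : Int := if b = 0 then 1 else 2 ^ (b - 1).toNat
-- Value B emits at site j of segment m of bunch b.
def pvF (s t T b m j : Int) : Int :=
  let w := pvW s b
  let h_max := t + w - 1
  let h := h_max - PySem.Int.mod (h_max - j) w
  let h2 := if (2 * m + 1) * 2 ^ h.toNat - 1 ≥ T then h - w else h
  (2 * m + 1) * 2 ^ h2.toNat - 1
-- Run n iterations of A's loop body, returning (yields, final state).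
def pvRunA (s t T : Int) : (Int × Int × Int) → Nat → List Int × (Int × Int × Int)
  | st, 0 => ([], st)
  | st, Nat.succ n =>
      let p := steadyStepA s t T st
      let q := pvRunA s t T p.1 n
      (p.2 :: q.1, q.2)
-- The block B emits for bunch b (in B's own index form).
def pvCb (s t T b : Int) : List Int :=
  (PySem.List.pyRange (if b ≠ 0 then 2 ^ (b - 1).toNat else 0) (2 ^ b.toNat) 1).flatMap
    (fun m => (PySem.List.pyRange 0 (pvW s b) 1).map (pvF s t T b m))
-- Blocks of the n bunches starting at b.
def pvCtail (s t T : Int) : Nat → Int → List Int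
  | 0, _ => []
  | Nat.succ n, b => pvCb s t T b ++ pvCtail s t T n (b + 1)
-- Number of sites in bunch b.
def pvCnt (s b : Int) : Nat := (pvSegs b * pvW s b).toNat
-- Number of sites in the n bunches starting at b.
def pvRn (s : Int) : Nat → Int → Nat
  | 0, _ => 0
  | Nat.succ n, b => pvCnt s b + pvRn s n (b + 1)
-- Outer-loop body of port B, named for the proofs.
def pvBodyB (s t T S : Int) (out : List Int) (b : Int) : List Int :=
  if (out.length : Int) ≥ S then out
  else
    let w := s - b + (if b = 0 then 1 else 0)
    let h_max := t + w - 1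
    (PySem.List.pyRange (if b ≠ 0 then 2 ^ (b - 1).toNat else 0) (2 ^ b.toNat) 1).foldl
      (fun (out : List Int) m =>
        (PySem.List.pyRange 0 w 1).foldl
          (fun (out : List Int) j =>
            let h := h_max - PySem.Int.mod (h_max - j) w
            let h2 := if (2 * m + 1) * 2 ^ h.toNat - 1 ≥ T then h - w else h
            out ++ [(2 * m + 1) * 2 ^ h2.toNat - 1])
          out)
      out

lemma altB_eq (S T : Int) :
    steady_lookup_impl_alt S T
      = (PySem.List.pyRange 0 (max ((PySem.Int.bitLength S : Int) - 1) 1) 1).foldl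
          (pvBodyB ((PySem.Int.bitLength S : Int) - 1)
            ((PySem.Int.bitLength T : Int) - ((PySem.Int.bitLength S : Int) - 1)) T S) [] := rfl

lemma pvFoldA (s t T : Int) : ∀ (l : List Int) (st : Int × Int × Int) (acc : List Int),
    (l.foldl (fun (p : (Int × Int × Int) × List Int) _k =>
        let r := steadyStepA s t T p.1
        (r.1, p.2 ++ [r.2])) (st, acc))
      = ((pvRunA s t T st l.length).2, acc ++ (pvRunA s t T st l.length).1) := by
  intro l
  induction l with
  | nil => intro st acc; simp [pvRunA]
  | cons x xs ih =>
      intro st acc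
      simp only [List.foldl_cons, List.length_cons, ih, pvRunA]
      simp

lemma pvW_pos (s b : Int) (hs : 0 ≤ s) (hb : 0 ≤ b) (hlt : b < max s 1) : 0 < pvW s b := by
  unfold pvW; split_ifs with h <;> omega

lemma m0_eq (b : Int) (hb : 0 ≤ b) :
    (2 : Int) ^ b.toNat - pvSegs b = if b ≠ 0 then (2 : Int) ^ (b - 1).toNat else 0 := by
  by_cases h : b = 0
  · subst h; norm_num [pvSegs]
  · have ht : b.toNat = (b - 1).toNat + 1 := by omega
    simp only [pvSegs, if_neg h, ht, pow_succ, ite_not]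
    ring

lemma stepA_first (s t T : Int) (hs : 0 ≤ s) :
    steadyStepA s t T (0, 1, s + 1) = steadyStepA s t T (0, 1, 0) := by
  have hmod : PySem.Int.mod (t + (s + 1) + s) (s + 1) = PySem.Int.mod (t + (s + 1) - 1) (s + 1) := by
    rw [PySem.Int.mod_eq_emod_of_pos (by omega), PySem.Int.mod_eq_emod_of_pos (by omega)]
    have h2 : t + (s + 1) + s = (t + (s + 1) - 1) + (s + 1) * 1 := by ring
    rw [h2, Int.add_mul_emod_self_left]
  unfold steadyStepA
  norm_num
  rw [hmod]

lemma stepA_site (s t T b m_b j : Int)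
    (hb : 0 ≤ b) (hw : 0 < pvW s b) (hmb : 1 ≤ m_b) (hj0 : 0 ≤ j) (hjw : j < pvW s b) :
    steadyStepA s t T (b, m_b, if j = 0 then 0 else pvW s b - j)
      = ((if j + 1 < pvW s b then (b, m_b, pvW s b - (j + 1))
          else if m_b = 1 then (b + 1, (2 : Int) ^ b.toNat, 0) else (b, m_b - 1, 0)),
         pvF s t T b (2 ^ b.toNat - m_b) j) := by
  unfold pvW at hw hjw ⊢
  unfold steadyStepA pvF pvW
  simp only
  generalize hgw : s - b + (if b = 0 then 1 else 0) = w at *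
  have hmod : PySem.Int.mod (t + w - 1 + (if j = 0 then 0 else w - j)) w
      = PySem.Int.mod (t + w - 1 - j) w := by
    by_cases hj : j = 0
    · simp [hj]
    · rw [if_neg hj, PySem.Int.mod_eq_emod_of_pos hw, PySem.Int.mod_eq_emod_of_pos hw]
      have h2 : t + w - 1 + (w - j) = (t + w - 1 - j) + w * 1 := by ring
      rw [h2, Int.add_mul_emod_self_left]
  rw [hmod]
  have hk2 : ((if (if j = 0 then (0:Int) else w - j) ≠ 0 then (if j = 0 then (0:Int) else w - j) else w) - 1)
      = w - (j + 1) := by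
    by_cases hj : j = 0 <;> simp [hj] <;> omega
  rw [hk2]
  by_cases hlast : j + 1 < w
  · have h1 : ¬ (w - (j+1) = 0) := by omega
    simp only [if_pos hlast, h1, if_neg, ite_false, if_false]
    simp [h1, ite_mul]
    constructor
    · omega
    · split_ifs <;> norm_num
  · have h1 : w - (j+1) = 0 := by omega
    by_cases hm1 : m_b = 1
    · simp only [if_neg hlast, if_pos hm1, h1, hm1]
      norm_num [ite_mul]
      split_ifs <;> norm_num
    · have h2 : ¬ (m_b - 1 = 0) := by omega
      simp only [if_neg hlast, if_neg hm1, h1]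
      simp [h2, ite_mul]
      split_ifs <;> norm_num

lemma pvRunA_add (s t T : Int) (m n : Nat) : ∀ (st : Int × Int × Int),
    pvRunA s t T st (m + n)
      = ((pvRunA s t T st m).1 ++ (pvRunA s t T (pvRunA s t T st m).2 n).1,
         (pvRunA s t T (pvRunA s t T st m).2 n).2) := by
  intro st
  induction m generalizing st with
  | zero => simp [pvRunA]
  | succ m ih => simp [Nat.succ_add, pvRunA, ih]

lemma runA_seg_tail (s t T b m_b : Int) (hb : 0 ≤ b) (hw : 0 < pvW s b) (hmb : 1 ≤ m_b) :
    ∀ (r : Nat), 1 ≤ r → (r : Int) ≤ pvW s b →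
    pvRunA s t T (b, m_b, if (r : Int) = pvW s b then 0 else (r : Int)) r
      = ((PySem.List.pyRange (pvW s b - r) (pvW s b) 1).map (pvF s t T b (2 ^ b.toNat - m_b)),
         if m_b = 1 then (b + 1, (2 : Int) ^ b.toNat, 0) else (b, m_b - 1, 0)) := by
  intro r
  induction r with
  | zero => intro h; exact absurd h (by norm_num)
  | succ r ih =>
    intro _ hle
    by_cases hr : r = 0
    · subst hr
      have hst : (if ((1:Nat) : Int) = pvW s b then (0:Int) else ((1:Nat) : Int))
          = (if pvW s b - 1 = 0 then (0:Int) else pvW s b - (pvW s b - 1)) := by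
        push_cast; split_ifs <;> omega
      have hs1 := stepA_site s t T b m_b (pvW s b - 1) hb hw hmb (by omega) (by omega)
      have hnl : ¬ (pvW s b - 1 + 1 < pvW s b) := by omega
      rw [if_neg hnl] at hs1
      show (_, _) = _
      rw [hst, hs1]
      have hsing := PySem.List.pyRange_one_singleton (pvW s b - 1)
      rw [show pvW s b - 1 + 1 = pvW s b from by ring] at hsing
      have : PySem.List.pyRange (pvW s b - ((1:Nat):Int)) (pvW s b) 1 = [pvW s b - 1] := by
        push_cast; exact hsing
      rw [this]
      simp [pvRunA]
    · have hr1 : 1 ≤ r := by omega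
      have hj0 : (0:Int) ≤ pvW s b - ((r:Int) + 1) := by push_cast at hle ⊢; omega
      have hjw : pvW s b - ((r:Int) + 1) < pvW s b := by omega
      have hst : (if (((r+1):Nat) : Int) = pvW s b then (0:Int) else (((r+1):Nat) : Int))
          = (if pvW s b - ((r:Int)+1) = 0 then (0:Int) else pvW s b - (pvW s b - ((r:Int)+1))) := by
        push_cast; split_ifs <;> omega
      have hs1 := stepA_site s t T b m_b (pvW s b - ((r:Int)+1)) hb hw hmb hj0 hjw
      have hl : pvW s b - ((r:Int)+1) + 1 < pvW s b := by omega
      rw [if_pos hl] at hs1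
      have hnext : pvW s b - (pvW s b - ((r:Int)+1) + 1) = (r:Int) := by ring
      rw [hnext] at hs1
      show (_, _) = _
      rw [hst, hs1]
      have hihst : (if ((r:Nat) : Int) = pvW s b then (0:Int) else ((r:Nat) : Int)) = (r:Int) := by
        rw [if_neg (by push_cast at hle ⊢; omega)]
      have ihr := ih hr1 (by push_cast at hle ⊢; omega)
      rw [hihst] at ihr
      simp only [pvRunA, ihr]
      have hcons : PySem.List.pyRange (pvW s b - (((r+1):Nat):Int)) (pvW s b) 1
          = (pvW s b - ((r:Int)+1)) :: PySem.List.pyRange (pvW s b - ((r:Nat):Int)) (pvW s b) 1 := by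
        push_cast
        rw [PySem.List.pyRange_one_cons (by omega)]
        congr 1
        ring
      rw [hcons]
      simp

lemma runA_segment (s t T b m_b : Int) (hb : 0 ≤ b) (hw : 0 < pvW s b) (hmb : 1 ≤ m_b) :
    pvRunA s t T (b, m_b, 0) (pvW s b).toNat
      = ((PySem.List.pyRange 0 (pvW s b) 1).map (pvF s t T b (2 ^ b.toNat - m_b)),
         if m_b = 1 then (b + 1, (2 : Int) ^ b.toNat, 0) else (b, m_b - 1, 0)) := by
  have hc : (((pvW s b).toNat : Nat) : Int) = pvW s b := Int.toNat_of_nonneg (by omega)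
  have h := runA_seg_tail s t T b m_b hb hw hmb (pvW s b).toNat (by omega) (by omega)
  rw [hc, if_pos rfl, sub_self] at h
  exact h

lemma runA_bunch (s t T b : Int) (hb : 0 ≤ b) (hw : 0 < pvW s b) :
    ∀ (c : Nat), 1 ≤ c → (c : Int) ≤ 2 ^ b.toNat →
    pvRunA s t T (b, (c : Int), 0) (c * (pvW s b).toNat)
      = ((PySem.List.pyRange (2 ^ b.toNat - c) (2 ^ b.toNat) 1).flatMap
           (fun m => (PySem.List.pyRange 0 (pvW s b) 1).map (pvF s t T b m)),
         (b + 1, (2 : Int) ^ b.toNat, 0)) := by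
  intro c
  induction c with
  | zero => intro h; exact absurd h (by norm_num)
  | succ c ih =>
    intro _ hle
    by_cases hc : c = 0
    · subst hc
      have h := runA_segment s t T b 1 hb hw (by norm_num)
      rw [if_pos rfl] at h
      have hsing := PySem.List.pyRange_one_singleton ((2:Int) ^ b.toNat - 1)
      rw [show (2:Int) ^ b.toNat - 1 + 1 = 2 ^ b.toNat from by ring] at hsing
      push_cast
      rw [show (1:Nat) * (pvW s b).toNat = (pvW s b).toNat from by ring]
      rw [h, hsing]
      simp
    · have hc1 : 1 ≤ c := by omega
      have hadd : (c + 1) * (pvW s b).toNat = (pvW s b).toNat + c * (pvW s b).toNat := by ring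
      rw [hadd, pvRunA_add]
      have hseg := runA_segment s t T b ((c:Int) + 1) hb hw (by omega)
      rw [if_neg (by omega), show (c:Int) + 1 - 1 = (c:Int) from by ring] at hseg
      have hst : ((((c:Nat) + 1 : Nat)) : Int) = (c:Int) + 1 := by push_cast; ring
      rw [show ((((c+1):Nat)) : Int) = (c:Int) + 1 from by push_cast; ring]
      rw [hseg]
      have ihr := ih hc1 (by omega)
      rw [ihr]
      have hcons : PySem.List.pyRange ((2:Int) ^ b.toNat - ((c:Int)+1)) (2 ^ b.toNat) 1
          = ((2:Int) ^ b.toNat - ((c:Int)+1)) :: PySem.List.pyRange ((2:Int) ^ b.toNat - (c:Int)) (2 ^ b.toNat) 1 := by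
        rw [PySem.List.pyRange_one_cons (by omega)]
        congr 1
        ring
      rw [hcons]
      simp

lemma pvSegs_pos (b : Int) : 1 ≤ pvSegs b := by
  unfold pvSegs; split_ifs
  · norm_num
  · exact one_le_pow₀ (by norm_num)

lemma pvSegs_le (b : Int) (hb : 0 ≤ b) : pvSegs b ≤ 2 ^ b.toNat := by
  unfold pvSegs
  split_ifs with h
  · exact one_le_pow₀ (by norm_num)
  · exact pow_le_pow_right₀ (by norm_num) (by omega)

lemma runA_bunches (s t T : Int) (hs : 0 ≤ s) :
    ∀ (n : Nat) (b0 : Int), 0 ≤ b0 → b0 + n = max s 1 →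
    pvRunA s t T (b0, pvSegs b0, 0) (pvRn s n b0)
      = (pvCtail s t T n b0, (max s 1, pvSegs (max s 1), 0)) := by
  intro n
  induction n with
  | zero =>
    intro b0 hb0 hmax
    push_cast at hmax
    simp only [pvRn, pvRunA, pvCtail]
    rw [show b0 = max s 1 from by omega]
  | succ n ih =>
    intro b0 hb0 hmax
    have hlt : b0 < max s 1 := by push_cast at hmax; omega
    have hw := pvW_pos s b0 hs hb0 hlt
    have h1 : 0 ≤ pvSegs b0 := le_trans (by norm_num) (pvSegs_pos b0)
    have hcnt : pvCnt s b0 = (pvSegs b0).toNat * (pvW s b0).toNat := by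
      unfold pvCnt
      have h2 : ((((pvSegs b0).toNat * (pvW s b0).toNat : Nat)) : Int) = pvSegs b0 * pvW s b0 := by
        push_cast
        rw [Int.toNat_of_nonneg h1, Int.toNat_of_nonneg (by omega)]
      omega
    simp only [pvRn, pvCtail, hcnt]
    rw [pvRunA_add]
    have hbunch := runA_bunch s t T b0 hb0 hw (pvSegs b0).toNat
      (by have := pvSegs_pos b0; omega)
      (by rw [Int.toNat_of_nonneg h1]; exact pvSegs_le b0 hb0)
    rw [Int.toNat_of_nonneg h1] at hbunch
    rw [hbunch]
    have hnext : pvSegs (b0 + 1) = (2:Int) ^ b0.toNat := by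
      unfold pvSegs
      rw [if_neg (by omega), show b0 + 1 - 1 = b0 from by ring]
    have ihr := ih (b0 + 1) (by omega) (by push_cast at hmax ⊢; omega)
    rw [hnext] at ihr
    rw [ihr]
    unfold pvCb
    rw [← m0_eq b0 hb0]

lemma bodyB_of_lt (s t T S : Int) (out : List Int) (b : Int) (h : (out.length : Int) < S) :
    pvBodyB s t T S out b = out ++ pvCb s t T b := by
  unfold pvBodyB
  rw [if_neg (by omega)]
  show (PySem.List.pyRange _ _ 1).foldl
      (fun out m => (PySem.List.pyRange 0 (pvW s b) 1).foldl
        (fun out j => out ++ [pvF s t T b m j]) out) out = _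
  have h1 : ∀ (m : Int) (o : List Int),
      (PySem.List.pyRange 0 (pvW s b) 1).foldl (fun out j => out ++ [pvF s t T b m j]) o
        = o ++ (PySem.List.pyRange 0 (pvW s b) 1).map (pvF s t T b m) := by
    intro m o; exact PySem.List.foldl_append_singleton_eq_map _ _ _
  simp only [h1]
  rw [PySem.List.foldl_append_eq_flatMap]
  rfl

lemma length_pvCb (s t T b : Int) (hb : 0 ≤ b) (hw : 0 ≤ pvW s b) :
    ((pvCb s t T b).length : Int) = pvCnt s b := by
  unfold pvCb pvCnt
  rw [← m0_eq b hb]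
  rw [List.length_flatMap]
  simp only [List.length_map, PySem.List.length_pyRange_one, sub_zero]
  rw [List.map_const', List.sum_replicate, smul_eq_mul, PySem.List.length_pyRange_one]
  have h1 := pvSegs_pos b
  have h2 : (2:Int) ^ b.toNat - (2 ^ b.toNat - pvSegs b) = pvSegs b := by ring
  rw [h2]
  push_cast
  rw [Int.toNat_of_nonneg (by omega), Int.toNat_of_nonneg hw, Int.toNat_of_nonneg (by nlinarith)]

lemma foldB_stuck (s t T S : Int) : ∀ (l : List Int) (acc : List Int),
    (S : Int) ≤ (acc.length : Int) → l.foldl (pvBodyB s t T S) acc = acc := by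
  intro l
  induction l with
  | nil => intro acc _; rfl
  | cons x xs ih =>
      intro acc h
      have : pvBodyB s t T S acc x = acc := by
        unfold pvBodyB; rw [if_pos (by omega)]
      simp [this, ih acc h]

lemma foldB_bunches (s t T S : Int) (hs : 0 ≤ s) :
    ∀ (n : Nat) (b0 : Int) (acc : List Int), 0 ≤ b0 → b0 + n = max s 1 →
    (acc.length : Int) + pvRn s n b0 = S →
    (PySem.List.pyRange b0 (max s 1) 1).foldl (pvBodyB s t T S) acc
      = acc ++ pvCtail s t T n b0 := by
  intro n
  induction n with
  | zero =>
    intro b0 acc hb0 hmax hlen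
    push_cast at hmax
    rw [PySem.List.pyRange_one_eq_nil (by omega)]
    simp [pvCtail]
  | succ n ih =>
    intro b0 acc hb0 hmax hlen
    have hlt : b0 < max s 1 := by push_cast at hmax; omega
    have hw := pvW_pos s b0 hs hb0 hlt
    have hcpos : 1 ≤ pvCnt s b0 := by
      unfold pvCnt
      have := pvSegs_pos b0
      nlinarith [Int.toNat_of_nonneg (show (0:Int) ≤ pvSegs b0 * pvW s b0 by nlinarith)]
    rw [PySem.List.pyRange_one_cons hlt]
    simp only [List.foldl_cons]
    have hacc : (acc.length : Int) < S := by
      simp only [pvRn] at hlen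
      push_cast at hlen
      omega
    rw [bodyB_of_lt s t T S acc b0 hacc]
    rw [ih (b0 + 1) (acc ++ pvCb s t T b0) (by omega) (by push_cast at hmax ⊢; omega)
      (by
        simp only [pvRn] at hlen
        rw [List.length_append]
        push_cast
        have hl := length_pvCb s t T b0 hb0 (by omega)
        push_cast at hlen ⊢
        omega)]
    simp [pvCtail]

lemma pvCnt_eval (σ β : Nat) (hβ : 1 ≤ β) (hle : β ≤ σ) :
    pvCnt (σ : Int) (β : Int) = 2 ^ (β - 1) * (σ - β) := by
  unfold pvCnt pvSegs pvW
  rw [if_neg (by omega), if_neg (by omega)]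
  have h1 : (((β:Int) - 1).toNat) = β - 1 := by omega
  rw [h1]
  simp only [add_zero]
  have h2 : ((2 ^ (β - 1) * (σ - β) : Nat) : Int) = (2:Int) ^ (β - 1) * ((σ:Int) - (β:Int)) := by
    push_cast [Nat.cast_sub hle]
    ring
  omega

lemma count_tail (σ : Nat) : ∀ (d β : Nat), 1 ≤ β → β + d = σ →
    pvRn (σ : Int) d (β : Int) + 2 ^ (β - 1) * (d + 2) = 2 ^ σ := by
  intro d
  induction d with
  | zero =>
    intro β hβ hsum
    obtain rfl : σ = β := by omega
    simp only [pvRn]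
    have h1 : 2 ^ (σ - 1) * 2 = 2 ^ σ := by
      rw [← pow_succ]
      congr 1
      omega
    omega
  | succ d ih =>
    intro β hβ hsum
    simp only [pvRn]
    have hc : pvCnt (σ:Int) (β:Int) = 2 ^ (β - 1) * (d + 1) := by
      rw [pvCnt_eval σ β hβ (by omega)]
      congr 1
      omega
    have ihr := ih (β + 1) (by omega) (by omega)
    rw [show (((β + 1 : Nat)) : Int) = (β : Int) + 1 from by push_cast; ring] at ihr
    have hpow : 2 ^ (β - 1) * (d + 1) + 2 ^ (β - 1) * (d + 1 + 2) = 2 ^ ((β + 1) - 1) * (d + 2) := by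
      have h1 : (β + 1) - 1 = (β - 1) + 1 := by omega
      rw [h1, pow_succ]
      ring
    omega

lemma count_total (σ : Nat) : pvRn (σ : Int) (max (σ : Int) 1).toNat 0 = 2 ^ σ := by
  by_cases h : σ = 0
  · subst h; decide
  · have h1 : (max ((σ:Nat) : Int) 1).toNat = (σ - 1) + 1 := by omega
    rw [h1]
    simp only [pvRn]
    have hc0 : pvCnt ((σ:Nat):Int) 0 = σ + 1 := by
      unfold pvCnt pvSegs pvW
      norm_num
    have ht := count_tail σ (σ - 1) 1 (by omega) (by omega)
    rw [show ((1:Nat):Int) = (0:Int) + 1 from by norm_num] at ht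
    rw [show (2:Nat) ^ (1 - 1) = 1 from by norm_num, one_mul,
      show σ - 1 + 2 = σ + 1 from by omega] at ht
    omega

lemma portA_eq (S T : Int) :
    steady_lookup_impl S T
      = (pvRunA ((PySem.Int.bitLength S : Int) - 1)
          ((PySem.Int.bitLength T : Int) - ((PySem.Int.bitLength S : Int) - 1)) T
          (0, 1, ((PySem.Int.bitLength S : Int) - 1) + 1)
          (PySem.List.pyRange 0 S 1).length).1 := by
  show ((PySem.List.pyRange 0 S 1).foldl _ (_, ([] : List Int))).2 = _
  rw [pvFoldA]
  simp

lemma main_eq (S T : Int) (hpre : Pre_steady_lookup_impl S T) :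
    steady_lookup_impl S T = steady_lookup_impl_alt S T := by
  obtain ⟨hST, hcase⟩ := hpre
  rcases hcase with hle | hpow
  · -- S ≤ 0: A iterates over an empty range, B's per-bunch bound is already met
    have hA : steady_lookup_impl S T = [] := by
      unfold steady_lookup_impl
      rw [PySem.List.pyRange_one_eq_nil hle]
      rfl
    have hB : steady_lookup_impl_alt S T = [] := by
      rw [altB_eq]
      exact foldB_stuck _ _ _ _ _ [] (by simpa using hle)
    rw [hA, hB]
  · -- S = 2^σ: both sides equal the common bunch/segment/site block list
    set σ : Nat := PySem.Int.bitLength S - 1 with hσ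
    have hbl : 1 ≤ PySem.Int.bitLength S := by
      by_contra hcon
      have h0 : PySem.Int.bitLength S = 0 := by omega
      have hlt := PySem.Int.lt_two_pow_bitLength S
      rw [h0, pow_zero] at hlt
      have hS0 : S = 0 := by omega
      rw [hS0] at hpow
      exact absurd hpow (by positivity)
    have hSpow : S = (2 : Int) ^ σ := hpow
    have hs : ((PySem.Int.bitLength S : Int) - 1) = (σ : Int) := by omega
    have hs0 : (0 : Int) ≤ (σ : Int) := by positivity
    have hScast : S = (((2 ^ σ : Nat)) : Int) := by push_cast; exact hSpow
    have hlen : (PySem.List.pyRange 0 S 1).length = (2 : Nat) ^ σ := by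
      rw [PySem.List.length_pyRange_one, sub_zero, hScast, Int.toNat_natCast]
    have hmax : (0 : Int) + ((max ((σ:Nat):Int) 1).toNat : Int) = max ((σ:Nat):Int) 1 := by
      omega
    rw [portA_eq, altB_eq, hlen, hs]
    set t : Int := (PySem.Int.bitLength T : Int) - (σ:Int) with ht
    obtain ⟨n, hn⟩ : ∃ n, (2 : Nat) ^ σ = n + 1 :=
      ⟨2 ^ σ - 1, by have := Nat.one_le_two_pow (n := σ); omega⟩
    have hswap : pvRunA (σ:Int) t T (0, 1, (σ:Int) + 1) (2 ^ σ)
        = pvRunA (σ:Int) t T (0, 1, 0) (2 ^ σ) := by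
      rw [hn]
      simp only [pvRunA, stepA_first (σ:Int) t T hs0]
    rw [hswap]
    have hrb := runA_bunches (σ:Int) t T hs0 (max ((σ:Nat):Int) 1).toNat 0 le_rfl hmax
    rw [count_total σ] at hrb
    have hsegs0 : pvSegs 0 = 1 := rfl
    rw [hsegs0] at hrb
    rw [hrb]
    -- B side
    rw [foldB_bunches (σ:Int) t T S hs0 (max ((σ:Nat):Int) 1).toNat 0 [] le_rfl hmax
      (by rw [count_total σ]; simpa using hScast.symm)]
    simp

-- ===== VERDICT (by name: the statement is the Claim_ definition above) =====
theorem steady_lookup_impl_spec : Claim_equal_steady_lookup_impl := by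
  intro S T _hdom hpre
  unfold Spec_steady_lookup_impl
  exact main_eq S T hpre
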